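-- pv_equiv track=rewrite | github.com/AriaKillebrewBruehl/Advent-of-Code | day11/day11.1.py | incrementAll
-- ===== SOURCE A (Python) =====
-- def incrementAll(grid):
--     toFlash = []
--     for r in range(len(grid)):
--         for c in range(len(grid[r])):
--             grid[r][c] += 1
--             if grid[r][c] > 9:
--                 toFlash += [[r, c]]
--     return toFlash
-- ===== SOURCE B (Python) =====
-- def incrementAll(grid):
--     # two passes: increment everything in place, then collect overflows
--     for row in grid:
--         for c in range(len(row)):
--             row[c] += 1
--     return [[r, c] for r, row in enumerate(grid) for c, val in enumerate(row) if val > 9]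
-- ===== Notes on version B (the rewrite author's own statement) =====
-- stated objective: simpler
-- what changed: Fused single index-driven loop split into an in-place increment pass followed by a separate enumerate-based comprehension that collects the flashing coordinates.
import Mathlib
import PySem

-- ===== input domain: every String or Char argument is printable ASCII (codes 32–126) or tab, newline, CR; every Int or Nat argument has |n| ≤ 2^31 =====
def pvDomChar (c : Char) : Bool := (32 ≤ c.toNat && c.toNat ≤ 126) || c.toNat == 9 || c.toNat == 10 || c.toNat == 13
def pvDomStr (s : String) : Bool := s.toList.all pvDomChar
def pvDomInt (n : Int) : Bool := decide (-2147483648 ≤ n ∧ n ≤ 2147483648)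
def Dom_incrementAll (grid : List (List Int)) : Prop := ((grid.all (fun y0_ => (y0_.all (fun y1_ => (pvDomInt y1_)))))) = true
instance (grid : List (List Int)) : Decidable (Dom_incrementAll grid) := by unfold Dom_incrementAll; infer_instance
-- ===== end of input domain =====

-- B splits A's fused loop into an in-place increment pass plus a separate enumerate comprehension;
-- equivalence is about the RETURN value (both Pythons mutate grid identically in place).

-- ===== PORT A =====
-- fused loop: increment grid[r][c], immediately record [r, c] when it exceeds 9
def incrementAll (grid : List (List Int)) : List (List Int) :=
  (PySem.List.pyRange 0 grid.length 1).foldl (fun toFlash r =>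
    let row := PySem.List.pyGetD grid r []
    (PySem.List.pyRange 0 row.length 1).foldl (fun tf c =>
      if PySem.List.pyGetD row c 0 + 1 > 9 then tf ++ [[r, c]] else tf) toFlash) []

-- ===== PORT B =====
-- pass 1: incremented grid; pass 2: comprehension over enumerate
def incrementAll_alt (grid : List (List Int)) : List (List Int) :=
  let g2 := grid.map (fun row => row.map (· + 1))
  (PySem.List.enumerate g2 0).flatMap (fun p =>
    (PySem.List.enumerate p.2 0).filterMap (fun q =>
      if q.2 > 9 then some [p.1, q.1] else none))

-- ===== PRECONDITION & SPEC =====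
def Spec_incrementAll (grid : List (List Int)) (out : List (List Int)) : Prop := out = incrementAll_alt grid
instance (grid : List (List Int)) (out : List (List Int)) : Decidable (Spec_incrementAll grid out) := by unfold Spec_incrementAll; infer_instance

-- ===== CLAIM (what is proved, stated in full; the proofs are below) =====
def Claim_equal_incrementAll : Prop := ∀ (grid : List (List Int)), Dom_incrementAll grid → Spec_incrementAll grid (incrementAll grid)

-- ===== LEMMAS AND PROOFS =====

-- (filter p).map f as a filterMap, so the two row shapes can be compared pointwise
theorem pvFilterMapOfFilterMap {α β : Type} (p : α → Bool) (f : α → β) (l : List α) :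
    (l.filter p).map f = l.filterMap (fun x => if p x then some (f x) else none) := by
  induction l with
  | nil => rfl
  | cons x xs ih => by_cases h : p x <;> simp [List.filter, List.filterMap, h, ih]

-- inner row: A's fold over range(len(row)) equals B's filterMap over enumerate of the incremented row
theorem pvRowEq (row : List Int) (r : Int) (acc : List (List Int)) :
    (PySem.List.pyRange 0 row.length 1).foldl (fun tf c =>
        if PySem.List.pyGetD row c 0 + 1 > 9 then tf ++ [[r, c]] else tf) acc
    = acc ++ (PySem.List.enumerate (row.map (· + 1)) 0).filterMap (fun q =>
        if q.2 > 9 then some [r, q.1] else none) := by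
  rw [PySem.List.foldl_append_ite (fun c => PySem.List.pyGetD row c 0 + 1 > 9) (fun c => [r, c]),
      PySem.List.enumerate_eq_map_pyRange (row.map (· + 1)) 0, List.filterMap_map]
  congr 1
  have hlen : PySem.List.len (row.map (· + 1)) = (row.length : Int) := by
    simp [PySem.List.len]
  rw [hlen, pvFilterMapOfFilterMap]
  refine List.filterMap_congr ?_
  intro c hc
  rcases PySem.List.mem_pyRange_one.1 hc with ⟨h0, h1⟩
  have h1' : c < ((row.map (· + 1)).length : Int) := by simpa using h1
  have h1'' : c < ((row.length : Nat) : Int) := h1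
  simp only [Function.comp,
    PySem.List.pyGetD_eq_getElem (row.map (· + 1)) 0 h0 h1',
    PySem.List.pyGetD_eq_getElem row 0 h0 h1'', List.getElem_map]
  simp

theorem incrementAll_spec_aux (grid : List (List Int)) :
    incrementAll grid = incrementAll_alt grid := by
  unfold incrementAll incrementAll_alt
  dsimp only
  rw [PySem.List.enumerate_eq_map_pyRange (List.map (fun row => List.map (fun x => x + 1) row) grid) [],
      List.flatMap_map,
      PySem.List.foldl_congr_mem' _ _
        (fun tf r => tf ++ (PySem.List.enumerate ((PySem.List.pyGetD grid r []).map (· + 1)) 0).filterMap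
          (fun q => if q.2 > 9 then some [r, q.1] else none)) []
        (fun r hr acc => pvRowEq (PySem.List.pyGetD grid r []) r acc),
      PySem.List.foldl_append_eq_flatMap, List.nil_append]
  have hlen : PySem.List.len (List.map (fun row => List.map (fun x => x + 1) row) grid) = (grid.length : Int) := by
    simp [PySem.List.len]
  rw [hlen, List.flatMap]
  rw [List.flatMap]
  congr 1
  refine List.map_congr_left ?_
  intro r hr
  rcases PySem.List.mem_pyRange_one.1 hr with ⟨h0, h1⟩
  have h1' : r < ((List.map (fun row => List.map (fun x => x + 1) row) grid).length : Int) := by simpa using h1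
  simp only [PySem.List.pyGetD_eq_getElem (List.map (fun row => List.map (fun x => x + 1) row) grid) [] h0 h1',
    PySem.List.pyGetD_eq_getElem grid [] h0 h1, List.getElem_map]

-- ===== VERDICT (by name: the statement is the Claim_ definition above) =====
theorem incrementAll_spec : Claim_equal_incrementAll := by
  intro grid _
  exact incrementAll_spec_aux grid
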